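-- pv_equiv track=rewrite | github.com/rauterfrank-ui/Peak_Trade | src/reporting/psychology_heatmap.py | _determine_cluster_from_tags
-- ===== SOURCE A (Python) =====
-- from typing import List, Dict, Any, Optional
--
-- def _determine_cluster_from_tags(tags: List[str]) -> str:
--     """Bestimmt den Trading-Cluster basierend auf Tags."""
--     tags_lower = [t.lower() for t in tags]
--
--     if any(t in tags_lower for t in ["trend", "trend_follow", "with_trend"]):
--         return "trend_follow"
--     elif any(t in tags_lower for t in ["counter", "reversal", "against_trend"]):
--         return "counter_trend"
--     elif any(t in tags_lower for t in ["breakout", "breakdown", "break"]):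
--         return "breakout"
--     elif any(t in tags_lower for t in ["exit", "take_profit", "tp"]):
--         return "exit"
--     elif any(t in tags_lower for t in ["reentry", "scaling", "add"]):
--         return "reentry"
--     else:
--         return "other"
-- ===== SOURCE B (Python) =====
-- _KEYWORD_TO_CLUSTER = {
--     "trend": "trend_follow", "trend_follow": "trend_follow", "with_trend": "trend_follow",
--     "counter": "counter_trend", "reversal": "counter_trend", "against_trend": "counter_trend",
--     "breakout": "breakout", "breakdown": "breakout", "break": "breakout",
--     "exit": "exit", "take_profit": "exit", "tp": "exit",
--     "reentry": "reentry", "scaling": "reentry", "add": "reentry",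
-- }
-- _CLUSTER_PRIORITY = ["trend_follow", "counter_trend", "breakout", "exit", "reentry"]
--
-- def _determine_cluster_from_tags(tags):
--     """Bestimmt den Trading-Cluster basierend auf Tags."""
--     present = set()
--     for t in tags:
--         cluster = _KEYWORD_TO_CLUSTER.get(t.lower())
--         if cluster is not None:
--             present.add(cluster)
--     for cluster in _CLUSTER_PRIORITY:
--         if cluster in present:
--             return cluster
--     return "other"
-- ===== Notes on version B (the rewrite author's own statement) =====
-- stated objective: faster
-- what changed: Replaces A's five repeated membership scans of the lowered tag list (15 keywords, each a linear scan) with a single pass that maps each tag through a keyword-to-cluster dict into a set of present clusters, then resolves by a fixed 5-element priority list.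
import Mathlib
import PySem

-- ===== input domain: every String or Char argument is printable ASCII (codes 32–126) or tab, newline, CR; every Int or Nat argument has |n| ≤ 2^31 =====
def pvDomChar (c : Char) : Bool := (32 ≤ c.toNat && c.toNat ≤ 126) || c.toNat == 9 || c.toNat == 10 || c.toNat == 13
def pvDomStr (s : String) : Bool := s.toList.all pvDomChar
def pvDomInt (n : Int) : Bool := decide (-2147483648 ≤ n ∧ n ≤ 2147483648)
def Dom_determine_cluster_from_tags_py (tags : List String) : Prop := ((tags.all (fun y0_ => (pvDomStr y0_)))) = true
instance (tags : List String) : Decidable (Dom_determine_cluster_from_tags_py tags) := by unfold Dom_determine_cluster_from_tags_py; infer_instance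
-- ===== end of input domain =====

-- B replaces A's five membership scans of the lowered tag list by one pass through the tags
-- via a keyword→cluster dict into a set of present clusters, resolved by a fixed priority list.

-- ===== PORT A =====
def determine_cluster_from_tags_py (tags : List String) : String :=
  let tags_lower := tags.map PySem.Str.lower
  if (["trend", "trend_follow", "with_trend"] : List String).any (fun t => tags_lower.contains t) then
    "trend_follow"
  else if (["counter", "reversal", "against_trend"] : List String).any (fun t => tags_lower.contains t) then
    "counter_trend"
  else if (["breakout", "breakdown", "break"] : List String).any (fun t => tags_lower.contains t) then
    "breakout"
  else if (["exit", "take_profit", "tp"] : List String).any (fun t => tags_lower.contains t) then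
    "exit"
  else if (["reentry", "scaling", "add"] : List String).any (fun t => tags_lower.contains t) then
    "reentry"
  else
    "other"

-- ===== PORT B =====
def pvKeywordToCluster : PySem.Dict String String := PySem.Dict.ofList
  [("trend", "trend_follow"), ("trend_follow", "trend_follow"), ("with_trend", "trend_follow"),
   ("counter", "counter_trend"), ("reversal", "counter_trend"), ("against_trend", "counter_trend"),
   ("breakout", "breakout"), ("breakdown", "breakout"), ("break", "breakout"),
   ("exit", "exit"), ("take_profit", "exit"), ("tp", "exit"),
   ("reentry", "reentry"), ("scaling", "reentry"), ("add", "reentry")]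

def pvClusterPriority : List String :=
  ["trend_follow", "counter_trend", "breakout", "exit", "reentry"]

def determine_cluster_from_tags_py_alt (tags : List String) : String :=
  let present : PySem.Set String := tags.foldl
    (fun s t =>
      match pvKeywordToCluster.get? (PySem.Str.lower t) with
      | some c => PySem.Set.add s c
      | none => s)
    PySem.Set.empty
  (pvClusterPriority.find? (fun c => PySem.Set.contains present c)).getD "other"

-- ===== PRECONDITION & SPEC =====
def Spec_determine_cluster_from_tags_py (tags : List String) (out : String) : Prop := out = determine_cluster_from_tags_py_alt tags
instance (tags : List String) (out : String) : Decidable (Spec_determine_cluster_from_tags_py tags out) := by unfold Spec_determine_cluster_from_tags_py; infer_instance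

-- ===== CLAIM (what is proved, stated in full; the proofs are below) =====
def Claim_equal_determine_cluster_from_tags_py : Prop := ∀ (tags : List String), Dom_determine_cluster_from_tags_py tags → Spec_determine_cluster_from_tags_py tags (determine_cluster_from_tags_py tags)

-- ===== LEMMAS AND PROOFS =====

-- membership in the set built by B's single pass
theorem mem_present_iff (l : List String) (s : PySem.Set String) (c : String) :
    c ∈ l.foldl
      (fun s t =>
        match pvKeywordToCluster.get? (PySem.Str.lower t) with
        | some c => PySem.Set.add s c
        | none => s) s ↔
    c ∈ s ∨ ∃ t ∈ l, pvKeywordToCluster.get? (PySem.Str.lower t) = some c := by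
  induction l generalizing s with
  | nil => simp
  | cons x xs ih =>
    simp only [List.foldl_cons, ih, List.mem_cons]
    cases h : pvKeywordToCluster.get? (PySem.Str.lower x) with
    | none =>
      constructor
      · rintro (hs | ⟨t, ht, hc⟩)
        · exact Or.inl hs
        · exact Or.inr ⟨t, Or.inr ht, hc⟩
      · rintro (hs | ⟨t, (rfl | ht), hc⟩)
        · exact Or.inl hs
        · simp [h] at hc
        · exact Or.inr ⟨t, ht, hc⟩
    | some c' =>
      rw [PySem.Set.mem_add]
      constructor
      · rintro ((hs | rfl) | ⟨t, ht, hc⟩)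
        · exact Or.inl hs
        · exact Or.inr ⟨x, Or.inl rfl, h⟩
        · exact Or.inr ⟨t, Or.inr ht, hc⟩
      · rintro (hs | ⟨t, (rfl | ht), hc⟩)
        · exact Or.inl (Or.inl hs)
        · rw [h] at hc; exact Or.inl (Or.inr (Option.some_injective _ hc).symm)
        · exact Or.inr ⟨t, ht, hc⟩

-- the keyword dict, looked up: exactly the 15 key/value pairs
set_option maxHeartbeats 2000000 in
theorem kw_get?_eq_some_iff (s c : String) :
    pvKeywordToCluster.get? s = some c ↔
      (c = "trend_follow" ∧ (s = "trend" ∨ s = "trend_follow" ∨ s = "with_trend")) ∨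
      (c = "counter_trend" ∧ (s = "counter" ∨ s = "reversal" ∨ s = "against_trend")) ∨
      (c = "breakout" ∧ (s = "breakout" ∨ s = "breakdown" ∨ s = "break")) ∨
      (c = "exit" ∧ (s = "exit" ∨ s = "take_profit" ∨ s = "tp")) ∨
      (c = "reentry" ∧ (s = "reentry" ∨ s = "scaling" ∨ s = "add")) := by
  constructor
  · intro h
    have hi := PySem.Dict.mem_items_of_get?_eq_some pvKeywordToCluster h
    rw [(by rfl : pvKeywordToCluster.items =
      [("trend", "trend_follow"), ("trend_follow", "trend_follow"), ("with_trend", "trend_follow"),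
       ("counter", "counter_trend"), ("reversal", "counter_trend"), ("against_trend", "counter_trend"),
       ("breakout", "breakout"), ("breakdown", "breakout"), ("break", "breakout"),
       ("exit", "exit"), ("take_profit", "exit"), ("tp", "exit"),
       ("reentry", "reentry"), ("scaling", "reentry"), ("add", "reentry")])] at hi
    simp only [List.mem_cons, List.not_mem_nil, or_false, Prod.mk.injEq] at hi
    rcases hi with ⟨rfl,rfl⟩|⟨rfl,rfl⟩|⟨rfl,rfl⟩|⟨rfl,rfl⟩|⟨rfl,rfl⟩|⟨rfl,rfl⟩|⟨rfl,rfl⟩|⟨rfl,rfl⟩|⟨rfl,rfl⟩|⟨rfl,rfl⟩|⟨rfl,rfl⟩|⟨rfl,rfl⟩|⟨rfl,rfl⟩|⟨rfl,rfl⟩|⟨rfl,rfl⟩ <;>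
      decide
  · rintro (⟨rfl, rfl|rfl|rfl⟩|⟨rfl, rfl|rfl|rfl⟩|⟨rfl, rfl|rfl|rfl⟩|⟨rfl, rfl|rfl|rfl⟩|⟨rfl, rfl|rfl|rfl⟩) <;> rfl

-- B's set-contains test equals A's keyword scan, per cluster
theorem contains_present_eq (tags : List String) (c : String) (kws : List String)
    (hk : ∀ u, pvKeywordToCluster.get? u = some c ↔ u ∈ kws) :
    PySem.Set.contains
      (tags.foldl
        (fun s t =>
          match pvKeywordToCluster.get? (PySem.Str.lower t) with
          | some c => PySem.Set.add s c
          | none => s)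
        PySem.Set.empty) c
      = kws.any (fun t => (tags.map PySem.Str.lower).contains t) := by
  rw [Bool.eq_iff_iff, PySem.Set.contains_iff, mem_present_iff]
  simp only [PySem.Set.empty, List.not_mem_nil, false_or, List.any_eq_true,
    List.contains_iff_mem, List.mem_map, hk]
  constructor
  · rintro ⟨t, ht, hmem⟩
    exact ⟨PySem.Str.lower t, hmem, t, ht, rfl⟩
  · rintro ⟨k, hkw, t, ht, rfl⟩
    exact ⟨t, ht, hkw⟩

-- ===== VERDICT (by name: the statement is the Claim_ definition above) =====
set_option maxHeartbeats 2000000 in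
theorem determine_cluster_from_tags_py_spec : Claim_equal_determine_cluster_from_tags_py := by
  intro tags _
  unfold Spec_determine_cluster_from_tags_py
  unfold determine_cluster_from_tags_py determine_cluster_from_tags_py_alt
  simp only [pvClusterPriority, List.find?]
  rw [contains_present_eq tags "trend_follow" ["trend", "trend_follow", "with_trend"]
        (by intro u; rw [kw_get?_eq_some_iff]; simp),
      contains_present_eq tags "counter_trend" ["counter", "reversal", "against_trend"]
        (by intro u; rw [kw_get?_eq_some_iff]; simp),
      contains_present_eq tags "breakout" ["breakout", "breakdown", "break"]
        (by intro u; rw [kw_get?_eq_some_iff]; simp),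
      contains_present_eq tags "exit" ["exit", "take_profit", "tp"]
        (by intro u; rw [kw_get?_eq_some_iff]; simp),
      contains_present_eq tags "reentry" ["reentry", "scaling", "add"]
        (by intro u; rw [kw_get?_eq_some_iff]; simp)]
  cases (["trend", "trend_follow", "with_trend"] : List String).any (fun t => (tags.map PySem.Str.lower).contains t) <;>
  cases (["counter", "reversal", "against_trend"] : List String).any (fun t => (tags.map PySem.Str.lower).contains t) <;>
  cases (["breakout", "breakdown", "break"] : List String).any (fun t => (tags.map PySem.Str.lower).contains t) <;>
  cases (["exit", "take_profit", "tp"] : List String).any (fun t => (tags.map PySem.Str.lower).contains t) <;>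
  cases (["reentry", "scaling", "add"] : List String).any (fun t => (tags.map PySem.Str.lower).contains t) <;>
  rfl
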